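-- pv_equiv track=rewrite | github.com/pypi-data/pypi-mirror-403 | packages/multiplied/multiplied-0.3.3-py3-none-any.whl/multiplied/core/truth.py | truth_scope
-- ===== SOURCE A (Python) =====
-- from collections.abc import Generator
--
-- def truth_scope(domain_: tuple[int,int], range_: tuple[int,int]) -> Generator:
--     """
--     A generator based on the domain and range of a desired truth table.
--     >>> domain = (min_in, max_in)
--     >>> range  = (min_out, max_out)
--     Yields: (operand_a, operand_b)
--     """
--     assert all([isinstance(d, int) for d in domain_])
--     assert all([isinstance(r, int) for r in range_])
--
--     min_in, max_in = domain_
--     min_out, max_out = range_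
--     if min_in <= 0 or min_out <= 0:
--         raise ValueError("Minimum input and output values must be greater than zero.")
--     if min_in > max_in:
--         raise ValueError("Minimum input value greater than maximum input value.")
--     if min_out > max_out:
--         raise ValueError("Minimum output greater than maximum output value.")
--
--     # Efficient calculation of possible input values via internet:
--     # for x < a * b < y use x/b < a < y/b to find limits of 'a', for a fixed 'b'
--
--     gen1 = (b for b in range(min_in, max_in + 1))
--     for b in gen1:
--         limit_mn_b = (min_out // b) if min_out < (min_out // b) else min_in
--         limit_mx_b = (max_out // b) if (max_out // b) < max_in else max_in
--         gen2 = (a for a in range(limit_mn_b, limit_mx_b+1))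
--         for a in gen2:
--             # -- b needs checks against a?? -- rethink approach --- #
--             yield a, b # BUG -- b needs stricter limits             #
-- ===== SOURCE B (Python) =====
-- from collections.abc import Generator
--
-- def truth_scope(domain_: tuple[int,int], range_: tuple[int,int]) -> Generator:
--     assert all([isinstance(d, int) for d in domain_])
--     assert all([isinstance(r, int) for r in range_])
--
--     min_in, max_in = domain_
--     min_out, max_out = range_
--     if min_in <= 0 or min_out <= 0:
--         raise ValueError("Minimum input and output values must be greater than zero.")
--     if min_in > max_in:
--         raise ValueError("Minimum input value greater than maximum input value.")
--     if min_out > max_out: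
--         raise ValueError("Minimum output greater than maximum output value.")
--
--     # Walk the full input rectangle with explicit while-loop counters and
--     # keep exactly the pairs whose product fits under max_out.
--     b = min_in
--     while b <= max_in:
--         a = min_in
--         while a <= max_in:
--             if a * b <= max_out:
--                 yield a, b
--             a += 1
--         b += 1
-- ===== Notes on version B (the rewrite author's own statement) =====
-- stated objective: simpler
-- what changed: Drops A's per-b divisor-bound arithmetic (min_out//b / max_out//b limits) and instead walks the whole input rectangle with two explicit while-loop counters, emitting a pair exactly when a*b <= max_out; same pairs in the same order.
import Mathlib
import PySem

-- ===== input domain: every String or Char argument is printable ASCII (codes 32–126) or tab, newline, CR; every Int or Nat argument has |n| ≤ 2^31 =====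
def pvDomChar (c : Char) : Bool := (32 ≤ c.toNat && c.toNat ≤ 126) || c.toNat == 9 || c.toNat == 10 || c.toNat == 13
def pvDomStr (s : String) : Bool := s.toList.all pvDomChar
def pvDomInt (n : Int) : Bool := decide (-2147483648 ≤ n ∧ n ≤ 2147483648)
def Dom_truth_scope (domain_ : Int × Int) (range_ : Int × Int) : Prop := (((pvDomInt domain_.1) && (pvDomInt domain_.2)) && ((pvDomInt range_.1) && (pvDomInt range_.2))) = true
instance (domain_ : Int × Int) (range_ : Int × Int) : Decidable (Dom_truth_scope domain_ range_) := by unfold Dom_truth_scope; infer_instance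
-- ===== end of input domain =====

-- B replaces A's per-b divisor-bound arithmetic by two explicit while-loop counters over the
-- full input rectangle, filtered by a*b <= max_out (same pairs, same order); objective: simpler.

-- ===== PORT A =====
def truth_scope (domain_ : Int × Int) (range_ : Int × Int) : List (Int × Int) :=
  let min_in := domain_.1
  let max_in := domain_.2
  let min_out := range_.1
  let max_out := range_.2
  (PySem.List.pyRange min_in (max_in + 1) 1).foldl (fun acc b =>
    let limit_mn_b := if min_out < PySem.Int.floordiv min_out b then PySem.Int.floordiv min_out b else min_in
    let limit_mx_b := if PySem.Int.floordiv max_out b < max_in then PySem.Int.floordiv max_out b else max_in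
    acc ++ (PySem.List.pyRange limit_mn_b (limit_mx_b + 1) 1).map (fun a => (a, b))) []

-- ===== PORT B =====
-- inner 'while a <= max_in' loop of Source B
def tsInner (b max_out a max_in : Int) : List (Int × Int) :=
  if _h : a ≤ max_in then
    (if a * b ≤ max_out then [(a, b)] else []) ++ tsInner b max_out (a + 1) max_in
  else []
termination_by (max_in + 1 - a).toNat
decreasing_by omega

-- outer 'while b <= max_in' loop of Source B
def tsOuter (min_in max_in max_out b : Int) : List (Int × Int) :=
  if _h : b ≤ max_in then
    tsInner b max_out min_in max_in ++ tsOuter min_in max_in max_out (b + 1)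
  else []
termination_by (max_in + 1 - b).toNat
decreasing_by omega

def truth_scope_alt (domain_ : Int × Int) (range_ : Int × Int) : List (Int × Int) :=
  tsOuter domain_.1 domain_.2 range_.2 domain_.1

-- ===== PRECONDITION & SPEC =====
-- Pre_ excludes exactly the inputs on which A raises ValueError (non-positive minima or inverted bounds).
def Pre_truth_scope (domain_ : Int × Int) (range_ : Int × Int) : Prop :=
  0 < domain_.1 ∧ 0 < range_.1 ∧ domain_.1 ≤ domain_.2 ∧ range_.1 ≤ range_.2
instance (domain_ : Int × Int) (range_ : Int × Int) : Decidable (Pre_truth_scope domain_ range_) := by unfold Pre_truth_scope; infer_instance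
def pvWitness_truth_scope : (Int × Int) × (Int × Int) := ((1, 3), (1, 6))

def Spec_truth_scope (domain_ : Int × Int) (range_ : Int × Int) (out : List (Int × Int)) : Prop := out = truth_scope_alt domain_ range_
instance (domain_ : Int × Int) (range_ : Int × Int) (out : List (Int × Int)) : Decidable (Spec_truth_scope domain_ range_ out) := by unfold Spec_truth_scope; infer_instance

-- ===== CLAIM =====
def Claim_equal_truth_scope : Prop := ∀ (domain_ : Int × Int) (range_ : Int × Int), Dom_truth_scope domain_ range_ → Pre_truth_scope domain_ range_ → Spec_truth_scope domain_ range_ (truth_scope domain_ range_)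

-- ===== LEMMAS AND PROOFS =====

-- The inner while-loop is the filtered-and-tagged range.
theorem tsInner_eq (b m hi : Int) : ∀ (n : Nat) (lo : Int), (hi + 1 - lo).toNat = n →
    tsInner b m lo hi =
      ((PySem.List.pyRange lo (hi + 1) 1).filter (fun a => decide (a * b ≤ m))).map (fun a => (a, b)) := by
  intro n
  induction n with
  | zero =>
    intro lo h
    rw [tsInner, dif_neg (show ¬ lo ≤ hi by omega), PySem.List.pyRange_one_eq_nil (by omega)]
    rfl
  | succ k ih =>
    intro lo h
    rw [tsInner, dif_pos (show lo ≤ hi by omega),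
      PySem.List.pyRange_one_cons (show lo < hi + 1 by omega)]
    by_cases hp : lo * b ≤ m
    · rw [if_pos hp, List.filter_cons_of_pos (by simpa using hp), List.map_cons,
        ih (lo + 1) (by omega)]; rfl
    · rw [if_neg hp, List.filter_cons_of_neg (by simpa using hp),
        ih (lo + 1) (by omega)]; rfl

-- The outer while-loop is a flatMap of inner loops over the range of b.
theorem tsOuter_eq (mi ma m : Int) : ∀ (n : Nat) (b : Int), (ma + 1 - b).toNat = n →
    tsOuter mi ma m b = (PySem.List.pyRange b (ma + 1) 1).flatMap (fun b => tsInner b m mi ma) := by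
  intro n
  induction n with
  | zero =>
    intro b h
    rw [tsOuter, dif_neg (show ¬ b ≤ ma by omega), PySem.List.pyRange_one_eq_nil (by omega)]
    rfl
  | succ k ih =>
    intro b h
    rw [tsOuter, dif_pos (show b ≤ ma by omega), ih (b + 1) (by omega),
      PySem.List.pyRange_one_cons (show b < ma + 1 by omega), List.flatMap_cons]

-- Filtering a step-1 range by "≤ m" just truncates the range.
theorem filter_le_pyRange (m : Int) : ∀ (n : Nat) (lo hi : Int), (hi - lo).toNat = n →
    (PySem.List.pyRange lo hi 1).filter (fun a => decide (a ≤ m)) =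
    PySem.List.pyRange lo (min (m + 1) hi) 1 := by
  intro n
  induction n with
  | zero =>
    intro lo hi h
    rw [PySem.List.pyRange_one_eq_nil (by omega), PySem.List.pyRange_one_eq_nil (by omega)]
    rfl
  | succ k ih =>
    intro lo hi h
    rw [PySem.List.pyRange_one_cons (by omega)]
    by_cases hm : lo ≤ m
    · rw [List.filter_cons_of_pos (by simpa using hm),
        ih (lo + 1) hi (by omega),
        PySem.List.pyRange_one_cons (show lo < min (m + 1) hi by omega)]
    · rw [List.filter_cons_of_neg (by simpa using hm),
        ih (lo + 1) hi (by omega),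
        PySem.List.pyRange_one_eq_nil (show min (m + 1) hi ≤ lo by omega),
        PySem.List.pyRange_one_eq_nil (by omega)]

-- ===== VERDICT =====
theorem truth_scope_spec : Claim_equal_truth_scope := by
  intro domain_ range_ _ hpre
  obtain ⟨h1, h2, h3, h4⟩ := hpre
  unfold Spec_truth_scope truth_scope truth_scope_alt
  rw [tsOuter_eq _ _ _ (domain_.2 + 1 - domain_.1).toNat _ rfl,
    show (PySem.List.pyRange domain_.1 (domain_.2 + 1) 1).flatMap (fun b => tsInner b range_.2 domain_.1 domain_.2) =
      ([] : List (Int × Int)) ++ (PySem.List.pyRange domain_.1 (domain_.2 + 1) 1).flatMap (fun b => tsInner b range_.2 domain_.1 domain_.2) from rfl,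
    ← PySem.List.foldl_append_eq_flatMap]
  apply PySem.List.foldl_congr_mem
  intro acc b hb
  have hb' : domain_.1 ≤ b ∧ b < domain_.2 + 1 := (PySem.List.mem_pyRange_one).mp hb
  have hbpos : 0 < b := by omega
  rw [tsInner_eq _ _ _ (domain_.2 + 1 - domain_.1).toNat _ rfl]
  -- A's lower limit collapses to min_in
  have hfd1 : PySem.Int.floordiv range_.1 b ≤ range_.1 := by
    rw [PySem.Int.floordiv_eq_ediv_of_pos hbpos]
    exact Int.ediv_le_self _ (by omega)
  rw [if_neg (by omega)]
  -- B's product filter is the truncated upper range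
  have hcongr : (PySem.List.pyRange domain_.1 (domain_.2 + 1) 1).filter (fun a => decide (a * b ≤ range_.2)) =
      (PySem.List.pyRange domain_.1 (domain_.2 + 1) 1).filter (fun a => decide (a ≤ PySem.Int.floordiv range_.2 b)) := by
    apply List.filter_congr
    intro a _
    simp only [decide_eq_decide]
    rw [PySem.Int.le_floordiv_iff_mul_le hbpos]
  rw [hcongr, filter_le_pyRange _ (domain_.2 + 1 - domain_.1).toNat _ _ rfl]
  by_cases hmx : PySem.Int.floordiv range_.2 b < domain_.2
  · rw [if_pos hmx,
      show min (PySem.Int.floordiv range_.2 b + 1) (domain_.2 + 1) = PySem.Int.floordiv range_.2 b + 1 from by omega]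
  · rw [if_neg hmx,
      show min (PySem.Int.floordiv range_.2 b + 1) (domain_.2 + 1) = domain_.2 + 1 from by omega]
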